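-- pv_equiv track=rewrite | github.com/Diligent06/Script_repo | Assets/convert.py | parse_mtl_blocks
-- ===== SOURCE A (Python) =====
-- def parse_mtl_blocks(mtl_content):
--     materials = []
--     current_block = []
--
--     for line in mtl_content.splitlines():
--         line = line.strip()
--         if line.startswith("newmtl"):
--             if current_block:
--                 if current_block[0].startswith("newmtl"):
--                     materials.append("\n".join(current_block))
--                 current_block = []
--         if line:  # 跳过空行
--             current_block.append(line)
--
--     if current_block:
--         materials.append("\n".join(current_block))
--
--     return materials
-- ===== SOURCE B (Python) =====
-- def parse_mtl_blocks(mtl_content):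
--     lines = [l.strip() for l in mtl_content.splitlines()]
--     lines = [l for l in lines if l]
--     rest = _drop_until_newmtl(lines)
--     if not rest:
--         return ["\n".join(lines)] if lines else []
--     return _blocks(rest)
--
-- def _drop_until_newmtl(lines):
--     k = 0
--     while k < len(lines) and not lines[k].startswith("newmtl"):
--         k += 1
--     return lines[k:]
--
-- def _blocks(lines):
--     if not lines:
--         return []
--     body = []
--     k = 1
--     while k < len(lines) and not lines[k].startswith("newmtl"):
--         body.append(lines[k])
--         k += 1
--     return ["\n".join([lines[0]] + body)] + _blocks(lines[k:])
-- ===== Notes on version B (the rewrite author's own statement) =====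
-- stated objective: alternative
-- what changed: Replaces A's single streaming loop with a flush-at-boundary accumulator by a staged build-then-partition structure: first build the stripped non-empty line list, then drop everything before the first newmtl, then recursively cut the remainder into blocks with takeWhile/dropWhile-style scans, handling the no-newmtl case once up front.
import Mathlib
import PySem

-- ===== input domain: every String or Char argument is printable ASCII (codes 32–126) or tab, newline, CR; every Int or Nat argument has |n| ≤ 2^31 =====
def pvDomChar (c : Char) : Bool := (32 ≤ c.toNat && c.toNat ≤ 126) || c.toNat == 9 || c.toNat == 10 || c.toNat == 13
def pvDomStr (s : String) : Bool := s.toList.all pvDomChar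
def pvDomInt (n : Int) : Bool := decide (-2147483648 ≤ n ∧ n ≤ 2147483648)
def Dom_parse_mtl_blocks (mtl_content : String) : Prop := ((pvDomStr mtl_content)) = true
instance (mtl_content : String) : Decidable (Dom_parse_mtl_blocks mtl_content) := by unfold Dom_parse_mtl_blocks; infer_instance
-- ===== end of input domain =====

-- B replaces A's streaming flush-at-boundary accumulator loop by a staged build-then-partition
-- structure (filter lines, drop the pre-newmtl prefix, recursively cut blocks); objective: alternative.

-- ===== PORT A =====
-- loop body of A, applied to the already-stripped line
def pvLoopA (st : List String × List String) (line : String) : List String × List String :=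
  let st :=
    if PySem.Str.startswith line "newmtl" then
      if st.2 ≠ [] then
        ((if PySem.Str.startswith (st.2.headD "") "newmtl" then
            st.1 ++ [PySem.Str.join "\n" st.2] else st.1), ([] : List String))
      else st
    else st
  if line ≠ "" then (st.1, st.2 ++ [line]) else st

def parse_mtl_blocks (mtl_content : String) : List String :=
  let r := (PySem.Str.splitlines mtl_content).foldl
      (fun st raw => pvLoopA st (PySem.Str.strip raw)) ([], [])
  if r.2 ≠ [] then r.1 ++ [PySem.Str.join "\n" r.2] else r.1

-- ===== PORT B =====
-- the while-loop of _drop_until_newmtl: skip lines until the first "newmtl" line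
def pvDropUntilNewmtl (lines : List String) : List String :=
  lines.dropWhile (fun l => !PySem.Str.startswith l "newmtl")

-- _blocks: head line starts a block; the while-loop collects the body up to the next "newmtl"
def pvBlocks : List String → List String
  | [] => []
  | x :: t =>
    PySem.Str.join "\n" (x :: t.takeWhile (fun l => !PySem.Str.startswith l "newmtl")) ::
    pvBlocks (t.dropWhile (fun l => !PySem.Str.startswith l "newmtl"))
termination_by ls => ls.length
decreasing_by
  simp only [List.length_cons]
  exact Nat.lt_succ_of_le (List.length_dropWhile_le ..)

def parse_mtl_blocks_alt (mtl_content : String) : List String :=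
  let lines := ((PySem.Str.splitlines mtl_content).map PySem.Str.strip).filter (fun l => l ≠ "")
  let rest := pvDropUntilNewmtl lines
  if rest = [] then (if lines = [] then [] else [PySem.Str.join "\n" lines])
  else pvBlocks rest

-- ===== PRECONDITION & SPEC =====
def Spec_parse_mtl_blocks (mtl_content : String) (out : List String) : Prop := out = parse_mtl_blocks_alt mtl_content
instance (mtl_content : String) (out : List String) : Decidable (Spec_parse_mtl_blocks mtl_content out) := by unfold Spec_parse_mtl_blocks; infer_instance

-- ===== CLAIM (what is proved, stated in full; the proofs are below) =====
def Claim_equal_parse_mtl_blocks : Prop := ∀ (mtl_content : String), Dom_parse_mtl_blocks mtl_content → Spec_parse_mtl_blocks mtl_content (parse_mtl_blocks mtl_content)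

-- ===== LEMMAS AND PROOFS =====

-- unfold equations for pvBlocks
theorem pvBlocks_nil : pvBlocks [] = [] := by rw [pvBlocks]

theorem pvBlocks_cons (x : String) (t : List String) :
    pvBlocks (x :: t) =
      PySem.Str.join "\n" (x :: t.takeWhile (fun l => !PySem.Str.startswith l "newmtl")) ::
      pvBlocks (t.dropWhile (fun l => !PySem.Str.startswith l "newmtl")) := by
  rw [pvBlocks]

-- A's epilogue (final flush)
def pvFin (q : List String × List String) : List String :=
  if q.2 ≠ [] then q.1 ++ [PySem.Str.join "\n" q.2] else q.1

theorem pvLoopA_empty (st : List String × List String) : pvLoopA st "" = st := by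
  have h : PySem.Str.startswith "" "newmtl" = false := by decide
  simp only [pvLoopA, h]
  simp

theorem pvFoldlA_filter (ls : List String) (st : List String × List String) :
    ls.foldl pvLoopA st = (ls.filter (fun l => l ≠ "")).foldl pvLoopA st := by
  induction ls generalizing st with
  | nil => rfl
  | cons l t ih =>
    by_cases hl : l = ""
    · subst hl; simp [pvLoopA_empty, ih]
    · simp [hl, List.foldl_cons, ih]

theorem pvTakeWhile_app (b ls : List String) (p : String → Bool) (hb : ∀ l ∈ b, p l = true) :
    (b ++ ls).takeWhile p = b ++ ls.takeWhile p := by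
  induction b with
  | nil => rfl
  | cons x t ih =>
    have hx := hb x (List.mem_cons_self ..)
    simp [hx, ih (fun l hl => hb l (List.mem_cons_of_mem _ hl))]

theorem pvDropWhile_app (b ls : List String) (p : String → Bool) (hb : ∀ l ∈ b, p l = true) :
    (b ++ ls).dropWhile p = ls.dropWhile p := by
  induction b with
  | nil => rfl
  | cons x t ih =>
    have hx := hb x (List.mem_cons_self ..)
    simp [hx, ih (fun l hl => hb l (List.mem_cons_of_mem _ hl))]

-- A's fold from a state whose block head is a "newmtl" line equals B's recursive cutter
theorem pvA_newmtl (ls : List String) (h : ∀ l ∈ ls, l ≠ "") (m : List String) (x : String)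
    (hx : PySem.Str.startswith x "newmtl" = true) (b' : List String)
    (hb : ∀ l ∈ b', PySem.Str.startswith l "newmtl" = false) :
    pvFin (ls.foldl pvLoopA (m, x :: b')) = m ++ pvBlocks (x :: (b' ++ ls)) := by
  induction ls generalizing m x b' with
  | nil =>
    rw [pvBlocks_cons]
    have h1 : (b' ++ ([] : List String)).takeWhile (fun l => !PySem.Str.startswith l "newmtl") = b' := by
      rw [pvTakeWhile_app _ _ _ (fun l hl => by simpa using hb l hl)]; simp
    have h2 : (b' ++ ([] : List String)).dropWhile (fun l => !PySem.Str.startswith l "newmtl") = ([] : List String) := by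
      rw [pvDropWhile_app _ _ _ (fun l hl => by simpa using hb l hl)]; rfl
    rw [h1, h2, pvBlocks_nil]
    simp [pvFin]
  | cons l t ih =>
    have hl : l ≠ "" := h l (List.mem_cons_self ..)
    have ht : ∀ y ∈ t, y ≠ "" := fun y hy => h y (List.mem_cons_of_mem _ hy)
    cases hsw : PySem.Str.startswith l "newmtl" with
    | true =>
      have hsw' := hsw; simp at hsw'
      have hx' := hx; simp at hx'
      have hstep : pvLoopA (m, x :: b') l = (m ++ [PySem.Str.join "\n" (x :: b')], [l]) := by
        simp [pvLoopA, hsw', hl, hx']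
      rw [List.foldl_cons, hstep, ih ht _ l hsw [] (by simp)]
      have h1 : (b' ++ l :: t).takeWhile (fun l => !PySem.Str.startswith l "newmtl") = b' := by
        rw [pvTakeWhile_app _ _ _ (fun y hy => by simpa using hb y hy)]
        simp [hsw']
      have h2 : (b' ++ l :: t).dropWhile (fun l => !PySem.Str.startswith l "newmtl") = l :: t := by
        rw [pvDropWhile_app _ _ _ (fun y hy => by simpa using hb y hy)]
        simp [hsw']
      conv_rhs => rw [pvBlocks_cons, h1, h2]
      simp
    | false =>
      have hsw' := hsw; simp at hsw'
      have hstep : pvLoopA (m, x :: b') l = (m, x :: (b' ++ [l])) := by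
        simp [pvLoopA, hsw', hl]
      have hb2 : ∀ y ∈ b' ++ [l], PySem.Str.startswith y "newmtl" = false := by
        intro y hy
        rcases List.mem_append.mp hy with h1 | h1
        · exact hb y h1
        · simp at h1; subst h1; exact hsw
      rw [List.foldl_cons, hstep, ih ht _ x hx _ hb2]
      simp

-- A's fold before the first "newmtl" line: the junk block is flushed only if no "newmtl" ever comes
theorem pvA_junk (ls : List String) (h : ∀ l ∈ ls, l ≠ "") (m : List String) (x : String)
    (hx : PySem.Str.startswith x "newmtl" = false) (b' : List String)
    (hb : ∀ l ∈ b', PySem.Str.startswith l "newmtl" = false) :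
    pvFin (ls.foldl pvLoopA (m, x :: b')) =
      if ls.all (fun l => !PySem.Str.startswith l "newmtl") then
        m ++ [PySem.Str.join "\n" (x :: (b' ++ ls))]
      else m ++ pvBlocks (ls.dropWhile (fun l => !PySem.Str.startswith l "newmtl")) := by
  induction ls generalizing m x b' with
  | nil => simp [pvFin]
  | cons l t ih =>
    have hl : l ≠ "" := h l (List.mem_cons_self ..)
    have ht : ∀ y ∈ t, y ≠ "" := fun y hy => h y (List.mem_cons_of_mem _ hy)
    have hx' := hx; simp at hx'
    cases hsw : PySem.Str.startswith l "newmtl" with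
    | true =>
      have hsw' := hsw; simp at hsw'
      have hstep : pvLoopA (m, x :: b') l = (m, [l]) := by
        simp [pvLoopA, hsw', hl, hx']
      rw [List.foldl_cons, hstep, pvA_newmtl t ht m l hsw [] (by simp)]
      simp [List.all_cons, hsw']
    | false =>
      have hsw' := hsw; simp at hsw'
      have hstep : pvLoopA (m, x :: b') l = (m, x :: (b' ++ [l])) := by
        simp [pvLoopA, hsw', hl]
      have hb2 : ∀ y ∈ b' ++ [l], PySem.Str.startswith y "newmtl" = false := by
        intro y hy
        rcases List.mem_append.mp hy with h1 | h1
        · exact hb y h1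
        · simp at h1; subst h1; exact hsw
      rw [List.foldl_cons, hstep, ih ht _ x hx _ hb2]
      simp [List.all_cons, hsw']

-- ===== VERDICT (by name: the statement is the Claim_ definition above) =====
theorem parse_mtl_blocks_spec : Claim_equal_parse_mtl_blocks := by
  intro s _
  unfold Spec_parse_mtl_blocks parse_mtl_blocks parse_mtl_blocks_alt pvDropUntilNewmtl
  have hA : (PySem.Str.splitlines s).foldl (fun st raw => pvLoopA st (PySem.Str.strip raw)) ([], []) =
      (((PySem.Str.splitlines s).map PySem.Str.strip).filter (fun l => l ≠ "")).foldl pvLoopA ([], []) := by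
    rw [← pvFoldlA_filter, List.foldl_map]
  show pvFin ((PySem.Str.splitlines s).foldl (fun st raw => pvLoopA st (PySem.Str.strip raw)) ([], [])) = _
  rw [hA]
  set F := (((PySem.Str.splitlines s).map PySem.Str.strip).filter (fun l => l ≠ "")) with hF
  have hne : ∀ l ∈ F, l ≠ "" := by
    intro l hlF
    have := List.of_mem_filter hlF
    simpa using this
  clear hF hA
  cases hFc : F with
  | nil => simp [pvFin]
  | cons x t =>
    have hx : x ≠ "" := hne x (by rw [hFc]; exact List.mem_cons_self ..)
    have ht : ∀ y ∈ t, y ≠ "" := fun y hy => hne y (by rw [hFc]; exact List.mem_cons_of_mem _ hy)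
    have hstep : pvLoopA ([], []) x = ([], [x]) := by
      cases hsw : PySem.Str.startswith x "newmtl" <;> (have hsw' := hsw; simp at hsw') <;>
        simp [pvLoopA, hsw', hx]
    rw [List.foldl_cons, hstep]
    cases hsw : PySem.Str.startswith x "newmtl" with
    | true =>
      have hsw' := hsw; simp at hsw'
      rw [pvA_newmtl t ht [] x hsw [] (by simp)]
      simp [hsw']
    | false =>
      have hsw' := hsw; simp at hsw'
      rw [pvA_junk t ht [] x hsw [] (by simp)]
      simp [hsw', List.dropWhile_eq_nil_iff]
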